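-- pv_equiv track=rewrite | github.com/albireo3754/Study_Algorithm | codility/21_StoneWall.py | solution
-- ===== SOURCE A (Python) =====
-- def solution(H):
--     # write your code in Python 3.6
--
--     heights = []
--     wallCnt = 0
--     nextHeights = []
--     for wall in H:
--         while wall> 0:
--             for height in heights:
--                 if wall == 0:
--                     break
--                 elif height> wall:
--                     nextHeights.append(wall)
--                     wall = 0
--                     wallCnt += 1
--                     break
--                 else:
--                     wall -= height
--                     nextHeights.append(height)
--             if wall != 0:
--                 nextHeights.append(wall)
--                 wall = 0
--                 wallCnt += 1
--         heights = nextHeights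
--         nextHeights = []
--     return wallCnt
-- ===== SOURCE B (Python) =====
-- def solution(H):
--     stack = []  # absolute heights of currently open stones, bottom to top (strictly increasing)
--     cnt = 0
--     for h in H:
--         while stack and stack[-1] > h:
--             stack.pop()
--         if h > 0 and (not stack or stack[-1] < h):
--             stack.append(h)
--             cnt += 1
--     return cnt
-- ===== Notes on version B (the rewrite author's own statement) =====
-- stated objective: faster
-- what changed: A keeps a list of height increments and rebuilds it per wall section via a nested for-loop (quadratic on increasing profiles); B keeps a monotonic stack of absolute heights, pops entries taller than the current section and counts pushes (amortised linear).
import Mathlib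
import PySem

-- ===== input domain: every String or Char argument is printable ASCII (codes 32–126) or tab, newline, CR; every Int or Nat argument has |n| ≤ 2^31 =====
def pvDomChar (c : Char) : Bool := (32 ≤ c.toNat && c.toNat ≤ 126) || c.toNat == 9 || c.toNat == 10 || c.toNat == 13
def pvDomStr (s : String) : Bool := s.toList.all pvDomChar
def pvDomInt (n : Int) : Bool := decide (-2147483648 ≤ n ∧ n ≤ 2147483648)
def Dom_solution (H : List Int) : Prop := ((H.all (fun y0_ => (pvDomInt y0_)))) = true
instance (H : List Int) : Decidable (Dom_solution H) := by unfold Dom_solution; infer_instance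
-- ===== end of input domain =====

-- B replaces A's per-wall rebuild of an increment list (nested loops) with a monotonic
-- stack of absolute heights; return values are proved equal on all inputs.

-- ===== PORT A =====
-- inner `for height in heights` loop: state (wall, nextHeights, wallCnt); breaks return directly
def forHeights : Int → List Int → List Int → Int → Int × List Int × Int
  | wall, [], nh, cnt => (wall, nh, cnt)
  | wall, h :: rest, nh, cnt =>
    if wall = 0 then (wall, nh, cnt)
    else if h > wall then (0, nh ++ [wall], cnt + 1)
    else forHeights (wall - h) rest (nh ++ [h]) cnt

-- `while wall > 0` loop; after the for-loop and the trailing `if wall != 0` fix-up,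
-- wall is 0, so the recursive call exits at once (measure: wall.toNat)
def whileWall (wall : Int) (heights nh : List Int) (cnt : Int) : List Int × Int :=
  if 0 < wall then
    let r := forHeights wall heights nh cnt
    if r.1 ≠ 0 then whileWall 0 heights (r.2.1 ++ [r.1]) (r.2.2 + 1)
    else whileWall 0 heights r.2.1 r.2.2
  else (nh, cnt)
termination_by wall.toNat
decreasing_by all_goals omega

def solution (H : List Int) : Int :=
  (H.foldl (fun (s : List Int × Int) wall => whileWall wall s.1 [] s.2) ([], 0)).2

-- ===== PORT B =====
-- `while stack and stack[-1] > h: stack.pop()`; the stack is stored top-first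
-- (Python appends/pops at the end), so popping is dropping from the head
def popTaller (h : Int) : List Int → List Int
  | [] => []
  | t :: rest => if t > h then popTaller h rest else t :: rest

def solution_alt (H : List Int) : Int :=
  (H.foldl (fun (s : List Int × Int) h =>
      let st := popTaller h s.1
      if 0 < h ∧ (st = [] ∨ st.headD 0 < h) then (h :: st, s.2 + 1) else (st, s.2))
    ([], 0)).2

-- ===== PRECONDITION & SPEC =====
def Spec_solution (H : List Int) (out : Int) : Prop := out = solution_alt H
instance (H : List Int) (out : Int) : Decidable (Spec_solution H out) := by unfold Spec_solution; infer_instance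

-- ===== CLAIM (what is proved, stated in full; the proofs are below) =====
def Claim_equal_solution : Prop := ∀ (H : List Int), Dom_solution H → Spec_solution H (solution H)

-- ===== LEMMAS AND PROOFS =====

-- partial sums of the increment list, from base b
def psums : List Int → Int → List Int
  | [], _ => []
  | d :: ds, b => (b + d) :: psums ds (b + d)

theorem psums_shift (hs : List Int) : ∀ c b : Int, psums hs (c + b) = (psums hs c).map (· + b) := by
  induction hs with
  | nil => intro c b; simp [psums]
  | cons d ds ih =>
      intro c b
      simp only [psums, List.map_cons]
      have h1 : c + b + d = (c + d) + b := by ring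
      rw [h1, ih]

theorem psums_pos (hs : List Int) : ∀ b : Int, (∀ d ∈ hs, 0 < d) → ∀ x ∈ psums hs b, b < x := by
  induction hs with
  | nil => intro b _ x hx; simp [psums] at hx
  | cons d ds ih =>
      intro b hpos x hx
      simp only [psums, List.mem_cons] at hx
      rcases hx with h | h
      · have := hpos d (by simp); omega
      · have hd := hpos d (by simp)
        have := ih (b + d) (fun e he => hpos e (by simp [he])) x h
        omega

theorem popTaller_all_gt (w : Int) (st : List Int) (h : ∀ x ∈ st, w < x) : popTaller w st = [] := by
  induction st with
  | nil => simp [popTaller]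
  | cons t rest ih =>
      have ht := h t (by simp)
      simp only [popTaller, if_pos ht]
      exact ih (fun x hx => h x (by simp [hx]))

theorem popTaller_append (w : Int) (ys zs : List Int) :
    popTaller w (ys ++ zs) =
      if popTaller w ys = [] then popTaller w zs else popTaller w ys ++ zs := by
  induction ys with
  | nil => simp [popTaller]
  | cons t rest ih =>
      by_cases ht : t > w
      · simpa [popTaller, ht] using ih
      · simp [popTaller, ht]

theorem popTaller_map_add (w d : Int) (st : List Int) :
    popTaller w (st.map (· + d)) = (popTaller (w - d) st).map (· + d) := by
  induction st with
  | nil => simp [popTaller]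
  | cons t rest ih =>
      by_cases ht : t > w - d
      · have : t + d > w := by omega
        simp [popTaller, ht, this, ih]
      · have : ¬ t + d > w := by omega
        simp [popTaller, ht, this]

theorem forHeights_zero (hs : List Int) (nh : List Int) (cnt : Int) :
    forHeights 0 hs nh cnt = (0, nh, cnt) := by
  cases hs <;> simp [forHeights]

-- frame lemma: the accumulators nh/cnt only grow; compute with empty accumulators
theorem forHeights_frame (hs : List Int) : ∀ wall nh cnt,
    forHeights wall hs nh cnt =
      ((forHeights wall hs [] 0).1,
       nh ++ (forHeights wall hs [] 0).2.1,
       cnt + (forHeights wall hs [] 0).2.2) := by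
  induction hs with
  | nil => intro wall nh cnt; simp [forHeights]
  | cons d rest ih =>
      intro wall nh cnt
      by_cases hw : wall = 0
      · simp [forHeights, hw]
      · by_cases hd : d > wall
        · simp [forHeights, hw, hd]
        · simp only [forHeights, if_neg hw, if_neg hd]
          rw [ih (wall - d) (nh ++ [d]) cnt, ih (wall - d) ([] ++ [d]) 0]
          simp

-- unfolding equations for the while-loop (well-founded recursion)
theorem whileWall_nonpos (wall : Int) (hs nh : List Int) (cnt : Int) (hw : ¬ 0 < wall) :
    whileWall wall hs nh cnt = (nh, cnt) := by
  rw [whileWall]; simp [hw]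

theorem whileWall_pos (wall : Int) (hs nh : List Int) (cnt : Int) (hw : 0 < wall) :
    whileWall wall hs nh cnt =
      (if (forHeights wall hs nh cnt).1 ≠ 0
       then ((forHeights wall hs nh cnt).2.1 ++ [(forHeights wall hs nh cnt).1],
             (forHeights wall hs nh cnt).2.2 + 1)
       else ((forHeights wall hs nh cnt).2.1, (forHeights wall hs nh cnt).2.2)) := by
  rw [whileWall]
  simp only [if_pos hw]
  by_cases h0 : (forHeights wall hs nh cnt).1 ≠ 0 <;>
    simp [h0, whileWall_nonpos 0 hs _ _ (by omega)]

-- A's result for one wall section: the new increment list and the count increment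
def dFof (wall : Int) (hs : List Int) : List Int :=
  if (forHeights wall hs [] 0).1 ≠ 0 then
    (forHeights wall hs [] 0).2.1 ++ [(forHeights wall hs [] 0).1]
  else (forHeights wall hs [] 0).2.1

def dcof (wall : Int) (hs : List Int) : Int :=
  if (forHeights wall hs [] 0).1 ≠ 0 then (forHeights wall hs [] 0).2.2 + 1
  else (forHeights wall hs [] 0).2.2

-- core lemma: one wall section, A's for-loop + fix-up versus B's pop + push
theorem core (hs : List Int) : ∀ wall : Int, 0 < wall → (∀ d ∈ hs, 0 < d) →
    (∀ d ∈ dFof wall hs, 0 < d) ∧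
    (if popTaller wall ((psums hs 0).reverse) = [] ∨
        (popTaller wall ((psums hs 0).reverse)).headD 0 < wall then
       (psums (dFof wall hs) 0).reverse = wall :: popTaller wall ((psums hs 0).reverse) ∧
       dcof wall hs = 1
     else
       (psums (dFof wall hs) 0).reverse = popTaller wall ((psums hs 0).reverse) ∧
       dcof wall hs = 0) := by
  induction hs with
  | nil =>
      intro wall hw _
      have hne : wall ≠ 0 := by omega
      simp [dFof, dcof, forHeights, psums, popTaller, hne, hw]
  | cons d rest ih =>
      intro wall hw hpos
      have hd := hpos d (by simp)
      have hrest : ∀ e ∈ rest, 0 < e := fun e he => hpos e (by simp [he])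
      have hwne : ¬ (wall = 0) := by omega
      have hst : (psums (d :: rest) 0).reverse = (psums rest d).reverse ++ [d] := by
        simp [psums]
      by_cases hgt : d > wall
      · -- A pushes the remainder wall immediately; B pops everything
        have hall : ∀ x ∈ (psums rest d).reverse ++ [d], wall < x := by
          intro x hx
          simp only [List.mem_append, List.mem_reverse, List.mem_singleton] at hx
          rcases hx with hx | hx
          · have := psums_pos rest d hrest x hx; omega
          · omega
        have hpop : popTaller wall ((psums (d :: rest) 0).reverse) = [] := by
          rw [hst]; exact popTaller_all_gt _ _ hall
        have hr : forHeights wall (d :: rest) [] 0 = (0, [wall], 1) := by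
          simp [forHeights, hwne, hgt]
        have hdF : dFof wall (d :: rest) = [wall] := by simp [dFof, hr]
        have hdc : dcof wall (d :: rest) = 1 := by simp [dcof, hr]
        rw [hpop, hdF, hdc]
        refine ⟨by intro e he; simp at he; omega, ?_⟩
        rw [if_pos (Or.inl rfl)]
        exact ⟨by simp [psums], rfl⟩
      · -- d ≤ wall: A consumes d, B compares against shifted sums
        have hstep : forHeights wall (d :: rest) [] 0 =
            ((forHeights (wall - d) rest [] 0).1,
             [d] ++ (forHeights (wall - d) rest [] 0).2.1,
             (forHeights (wall - d) rest [] 0).2.2) := by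
          simp only [forHeights, if_neg hwne, if_neg hgt]
          rw [forHeights_frame rest (wall - d) ([] ++ [d]) 0]
          simp
        have hshift : psums rest d = (psums rest 0).map (· + d) := by
          have := psums_shift rest 0 d; simpa using this
        have hpopfull : popTaller wall ((psums (d :: rest) 0).reverse) =
            (popTaller (wall - d) ((psums rest 0).reverse)).map (· + d) ++ [d] := by
          rw [hst, hshift, ← List.map_reverse, popTaller_append, popTaller_map_add]
          by_cases hnil : popTaller (wall - d) ((psums rest 0).reverse) = []
          · simp [hnil, popTaller, hgt]
          · simp [hnil]
        by_cases hwd : wall - d = 0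
        · -- remainder exactly 0: A re-appends d only, no new stone; B finds top = wall
          have hr0 : forHeights wall (d :: rest) [] 0 = (0, [d], 0) := by
            rw [hstep, hwd, forHeights_zero]
            simp
          have hp1 : popTaller (wall - d) ((psums rest 0).reverse) = [] := by
            rw [hwd]
            exact popTaller_all_gt _ _ (fun x hx => by
              have := psums_pos rest 0 hrest x (List.mem_reverse.mp hx); omega)
          have hd_eq : d = wall := by omega
          have hdF : dFof wall (d :: rest) = [d] := by simp [dFof, hr0]
          have hdc : dcof wall (d :: rest) = 0 := by simp [dcof, hr0]
          rw [hpopfull, hp1, hdF, hdc, List.map_nil, List.nil_append]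
          have hcond : ¬ (([d] : List Int) = [] ∨ ([d] : List Int).headD 0 < wall) := by
            simp [hd_eq]
          rw [if_neg hcond]
          exact ⟨by intro e he; simp at he; omega, by simp [psums], rfl⟩
        · -- remainder positive: apply the induction hypothesis at wall - d
          have hwd' : 0 < wall - d := by omega
          obtain ⟨IHpos, IHmain⟩ := ih (wall - d) hwd' hrest
          have hdF : dFof wall (d :: rest) = d :: dFof (wall - d) rest := by
            unfold dFof; rw [hstep]
            by_cases h0 : (forHeights (wall - d) rest [] 0).1 = 0 <;> simp [h0]
          have hdc : dcof wall (d :: rest) = dcof (wall - d) rest := by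
            unfold dcof; rw [hstep]
          have hpsD : (psums (d :: dFof (wall - d) rest) 0).reverse
              = ((psums (dFof (wall - d) rest) 0).reverse).map (· + d) ++ [d] := by
            have := psums_shift (dFof (wall - d) rest) 0 d
            simp only [psums, zero_add]
            rw [show psums (dFof (wall - d) rest) d
                  = (psums (dFof (wall - d) rest) 0).map (· + d) from by simpa using this]
            simp [List.map_reverse]
          set st1 := popTaller (wall - d) ((psums rest 0).reverse) with hst1
          have hcond_iff :
              ((st1.map (· + d) ++ [d] : List Int) = [] ∨
                (st1.map (· + d) ++ [d]).headD 0 < wall)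
              ↔ (st1 = [] ∨ st1.headD 0 < wall - d) := by
            cases st1 with
            | nil => simp; omega
            | cons a t => simp; omega
          rw [hpopfull, hdF, hdc]
          refine ⟨?_, ?_⟩
          · intro e he
            rcases List.mem_cons.mp he with he | he
            · omega
            · exact IHpos e he
          · by_cases hc : st1 = [] ∨ st1.headD 0 < wall - d
            · obtain ⟨heq, hcnt⟩ := (if_pos hc ▸ IHmain)
              rw [if_pos (hcond_iff.mpr hc)]
              refine ⟨?_, hcnt⟩
              rw [hpsD, heq]
              simp
            · obtain ⟨heq, hcnt⟩ := (if_neg hc ▸ IHmain)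
              rw [if_neg (fun h => hc (hcond_iff.mp h))]
              refine ⟨?_, hcnt⟩
              rw [hpsD, heq]

-- one outer iteration: A's while-loop versus B's pop-and-push, related by psums
theorem step_eq (wall : Int) (hs : List Int) (cnt : Int) (hpos : ∀ d ∈ hs, 0 < d) :
    (∀ d ∈ (whileWall wall hs [] cnt).1, 0 < d) ∧
    (if 0 < wall ∧ (popTaller wall ((psums hs 0).reverse) = [] ∨
          (popTaller wall ((psums hs 0).reverse)).headD 0 < wall) then
       ((wall :: popTaller wall ((psums hs 0).reverse), cnt + 1) : List Int × Int)
     else (popTaller wall ((psums hs 0).reverse), cnt)).1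
      = (psums (whileWall wall hs [] cnt).1 0).reverse ∧
    (whileWall wall hs [] cnt).2
      = (if 0 < wall ∧ (popTaller wall ((psums hs 0).reverse) = [] ∨
            (popTaller wall ((psums hs 0).reverse)).headD 0 < wall) then
           ((wall :: popTaller wall ((psums hs 0).reverse), cnt + 1) : List Int × Int)
         else (popTaller wall ((psums hs 0).reverse), cnt)).2 := by
  by_cases hw : 0 < wall
  · obtain ⟨Cpos, Cmain⟩ := core hs wall hw hpos
    have hWW : whileWall wall hs [] cnt = (dFof wall hs, cnt + dcof wall hs) := by
      rw [whileWall_pos wall hs [] cnt hw, forHeights_frame hs wall [] cnt]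
      unfold dFof dcof
      by_cases h0 : (forHeights wall hs [] 0).1 = 0
      · simp [h0]
      · simp [h0]
        ring
    rw [hWW]
    by_cases hc : popTaller wall ((psums hs 0).reverse) = [] ∨
        (popTaller wall ((psums hs 0).reverse)).headD 0 < wall
    · obtain ⟨heq, hcnt⟩ := (if_pos hc ▸ Cmain)
      rw [if_pos (⟨hw, hc⟩ : _ ∧ _)]
      exact ⟨Cpos, by simpa using heq.symm, by simp [hcnt]⟩
    · obtain ⟨heq, hcnt⟩ := (if_neg hc ▸ Cmain)
      rw [if_neg (fun h => hc h.2)]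
      exact ⟨Cpos, by simpa using heq.symm, by simp [hcnt]⟩
  · -- wall ≤ 0: A resets heights to [] and counts nothing; B pops everything, no push
    rw [whileWall_nonpos wall hs [] cnt hw]
    have hpop : popTaller wall ((psums hs 0).reverse) = [] :=
      popTaller_all_gt _ _ (fun x hx => by
        have := psums_pos hs 0 hpos x (List.mem_reverse.mp hx); omega)
    rw [if_neg (fun h => hw h.1)]
    simp [hpop, psums]

-- fold the step lemma over the whole list
theorem fold_eq (H : List Int) : ∀ (hs : List Int) (cnt : Int), (∀ d ∈ hs, 0 < d) →
    (H.foldl (fun (s : List Int × Int) wall => whileWall wall s.1 [] s.2) (hs, cnt)).2 =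
    (H.foldl (fun (s : List Int × Int) h =>
        let st := popTaller h s.1
        if 0 < h ∧ (st = [] ∨ st.headD 0 < h) then (h :: st, s.2 + 1) else (st, s.2))
      ((psums hs 0).reverse, cnt)).2 := by
  induction H with
  | nil => intro hs cnt _; simp
  | cons w t ih =>
      intro hs cnt hpos
      obtain ⟨Spos, Sst, Scnt⟩ := step_eq w hs cnt hpos
      simp only [List.foldl_cons]
      rw [ih (whileWall w hs [] cnt).1 (whileWall w hs [] cnt).2 Spos]
      congr 1
      rw [← Sst, Scnt]

-- ===== VERDICT (by name: the statement is the Claim_ definition above) =====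
theorem solution_spec : Claim_equal_solution := by
  intro H _
  unfold Spec_solution solution solution_alt
  have := fold_eq H [] 0 (by simp)
  simpa [psums] using this
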